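-- pv_equiv track=rewrite | github.com/urxvtcd/draw-a-lamport | main.py | read_diagram
-- ===== SOURCE A (Python) =====
-- def read_diagram(source):
--     actors = []
--     events = []
--     first = True
--
--     for line in source.splitlines():
--         line = line.strip()
--         if line.startswith("#"):
--             continue
--
--         if line == "":
--             first = False
--         elif first:
--             actors.append(line)
--         else:
--             events.append(line)
--
--     return actors, events
-- ===== SOURCE B (Python) =====
-- def read_diagram(source):
--     lines = [l for l in (raw.strip() for raw in source.splitlines())
--              if not l.startswith("#")]
--     try:
--         i = lines.index("")
--     except ValueError:
--         return lines, []
--     return lines[:i], [l for l in lines[i:] if l != ""]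
-- ===== Notes on version B (the rewrite author's own statement) =====
-- stated objective: simpler
-- what changed: Replaces the running boolean flag and per-line branching with a pre-filtered list of stripped non-comment lines, locating the leading blank by index() and returning the prefix and the blank-filtered suffix as slices.
import Mathlib
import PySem

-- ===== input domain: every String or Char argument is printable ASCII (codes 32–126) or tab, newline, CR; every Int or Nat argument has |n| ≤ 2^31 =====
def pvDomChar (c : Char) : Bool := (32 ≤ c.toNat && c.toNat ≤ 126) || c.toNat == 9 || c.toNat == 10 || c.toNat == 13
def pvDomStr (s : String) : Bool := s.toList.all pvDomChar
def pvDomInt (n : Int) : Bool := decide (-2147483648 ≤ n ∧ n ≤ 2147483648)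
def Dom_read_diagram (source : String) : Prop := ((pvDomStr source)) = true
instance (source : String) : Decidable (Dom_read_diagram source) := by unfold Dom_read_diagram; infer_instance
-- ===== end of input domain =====

-- B drops the running boolean flag: it pre-filters stripped non-comment lines, finds the
-- first blank by index, and slices (objective: simpler decomposition; same cost).

-- ===== PORT A =====
-- state: (actors, events, first-flag)
def read_diagram (source : String) : List String × List String :=
  let st := (PySem.Str.splitlines source).foldl
    (fun (st : List String × List String × Bool) line =>
      let line := PySem.Str.strip line
      if PySem.Str.startswith line "#" then st
      else if line = "" then (st.1, st.2.1, false)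
      else if st.2.2 then (st.1 ++ [line], st.2.1, st.2.2)
      else (st.1, st.2.1 ++ [line], st.2.2)) ([], [], true)
  (st.1, st.2.1)

-- ===== PORT B =====
def read_diagram_alt (source : String) : List String × List String :=
  let lines := ((PySem.Str.splitlines source).map PySem.Str.strip).filter
      (fun l => !PySem.Str.startswith l "#")
  match PySem.List.index? lines "" with
  | none => (lines, [])
  | some i => (lines.take i, (lines.drop i).filter (fun l => l != ""))

-- ===== PRECONDITION & SPEC =====
def Spec_read_diagram (source : String) (out : List String × List String) : Prop := out = read_diagram_alt source
instance (source : String) (out : List String × List String) : Decidable (Spec_read_diagram source out) := by unfold Spec_read_diagram; infer_instance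

-- ===== CLAIM (what is proved, stated in full; the proofs are below) =====
def Claim_equal_read_diagram : Prop := ∀ (source : String), Dom_read_diagram source → Spec_read_diagram source (read_diagram source)

-- ===== LEMMAS AND PROOFS =====

-- A's per-line step after stripping/comment-skipping
def pvStep (st : List String × List String × Bool) (l : String) : List String × List String × Bool :=
  if l = "" then (st.1, st.2.1, false)
  else if st.2.2 then (st.1 ++ [l], st.2.1, st.2.2)
  else (st.1, st.2.1 ++ [l], st.2.2)

lemma foldA_eq_foldStep (lines : List String) (st : List String × List String × Bool) :
    lines.foldl
      (fun (st : List String × List String × Bool) line =>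
        let line := PySem.Str.strip line
        if PySem.Str.startswith line "#" then st
        else if line = "" then (st.1, st.2.1, false)
        else if st.2.2 then (st.1 ++ [line], st.2.1, st.2.2)
        else (st.1, st.2.1 ++ [line], st.2.2)) st
    = ((lines.map PySem.Str.strip).filter (fun l => !PySem.Str.startswith l "#")).foldl
        pvStep st := by
  induction lines generalizing st with
  | nil => rfl
  | cons x xs ih =>
      simp only [List.foldl_cons, List.map_cons, List.filter_cons]
      by_cases h : PySem.Chars.startswith (PySem.Chars.strip x.toList) ['#'] = true
      · simp [h]
        simpa using ih st
      · simp [h]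
        have := ih (if PySem.Str.strip x = "" then (st.1, st.2.1, false)
          else if st.2.2 = true then (st.1 ++ [PySem.Str.strip x], st.2.1, st.2.2)
          else (st.1, st.2.1 ++ [PySem.Str.strip x], st.2.2))
        simpa using this

lemma foldStep_false (ls : List String) (a e : List String) :
    ls.foldl pvStep (a, e, false) = (a, e ++ ls.filter (fun l => l != ""), false) := by
  induction ls generalizing e with
  | nil => simp
  | cons x xs ih =>
      by_cases h : x = ""
      · simp [pvStep, h, ih]
      · simp [pvStep, h, ih]

lemma foldStep_true_no_blank (ls : List String) (h : "" ∉ ls) (a e : List String) :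
    ls.foldl pvStep (a, e, true) = (a ++ ls, e, true) := by
  induction ls generalizing a with
  | nil => simp
  | cons x xs ih =>
      have hx : x ≠ "" := fun hx => h (hx ▸ List.mem_cons_self ..)
      have hxs : "" ∉ xs := fun hm => h (List.mem_cons_of_mem _ hm)
      simp [pvStep, hx, ih hxs]

-- ===== VERDICT (by name: the statement is the Claim_ definition above) =====
theorem read_diagram_spec : Claim_equal_read_diagram := by
  intro source _
  unfold Spec_read_diagram read_diagram read_diagram_alt
  simp only [foldA_eq_foldStep]
  set ls := ((PySem.Str.splitlines source).map PySem.Str.strip).filter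
      (fun l => !PySem.Str.startswith l "#") with hls
  rcases hidx : PySem.List.index? ls "" with _ | i
  · have hnm : "" ∉ ls := (PySem.List.index?_eq_none_iff ..).mp hidx
    simp [foldStep_true_no_blank ls hnm]
  · obtain ⟨pre, suf, hsplit, hlen, hpre⟩ := (PySem.List.index?_eq_some_iff ..).mp hidx
    subst hlen
    rw [hsplit]
    rw [List.foldl_append, foldStep_true_no_blank pre hpre, List.foldl_cons]
    have : pvStep (([] : List String) ++ pre, ([] : List String), true) "" = (pre, [], false) := by
      simp [pvStep]
    rw [this, foldStep_false]
    simp
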